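-- pv_equiv track=rewrite | github.com/MemberJunction/MJ | scripts/pg_convert_seeddata.py | extract_inserts
-- ===== SOURCE A (Python) =====
-- def extract_inserts(lines, start, end):
--     """Extract INSERT statements from the seed section, joining multi-line ones.
--
--     Uses a boundary-based approach: each INSERT runs from its start line until
--     the line before the next INSERT, PRINT, GO, IF, ALTER, or end of section.
--     """
--     inserts = []
--     # First pass: find all INSERT start line indices
--     insert_starts = []
--     for i in range(start, end + 1):
--         stripped = lines[i].strip()
--         if (stripped.startswith('INSERT INTO [${flyway:defaultSchema}]')
--                 and not lines[i].startswith('    ')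
--                 and not lines[i].startswith('\t')):
--             insert_starts.append(i)
--
--     # Second pass: for each INSERT, collect lines until the next boundary
--     for idx, line_num in enumerate(insert_starts):
--         # Determine end boundary
--         if idx + 1 < len(insert_starts):
--             boundary = insert_starts[idx + 1]
--         else:
--             boundary = end + 1
--
--         # Collect all lines from this INSERT to the boundary, skipping
--         # GO, IF, PRINT lines that appear between INSERTs
--         parts = []
--         for j in range(line_num, boundary):
--             line_stripped = lines[j].strip()
--             if not line_stripped:
--                 continue
--             if line_stripped in ('GO', 'GO;'):
--                 continue
--             if line_stripped.startswith('IF @@ERROR'):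
--                 continue
--             if line_stripped.startswith('PRINT('):
--                 continue
--             if line_stripped.startswith('PRINT N'):
--                 continue
--             if j > line_num and line_stripped.startswith('INSERT INTO'):
--                 break
--             parts.append(lines[j].rstrip('\n').rstrip('\r'))
--
--         full_insert = '\n'.join(parts)
--         inserts.append(full_insert)
--
--     return inserts
-- ===== SOURCE B (Python) =====
-- def extract_inserts(lines, start, end):
--     """Single forward pass over the section: a state machine with a current
--     statement buffer instead of precomputing INSERT start indices."""
--     PREFIX = 'INSERT INTO [${flyway:defaultSchema}]'
--     window = [lines[i] for i in range(start, end + 1)]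
--     results = []
--     current = None
--     for raw in window:
--         stripped = raw.strip()
--         if (stripped.startswith(PREFIX)
--                 and not raw.startswith('    ')
--                 and not raw.startswith('\t')):
--             if current is not None:
--                 results.append('\n'.join(current))
--             current = [raw.rstrip('\n').rstrip('\r')]
--         elif current is None:
--             continue
--         elif not stripped:
--             continue
--         elif stripped in ('GO', 'GO;'):
--             continue
--         elif stripped.startswith(('IF @@ERROR', 'PRINT(', 'PRINT N')):
--             continue
--         elif stripped.startswith('INSERT INTO'):
--             results.append('\n'.join(current))
--             current = None
--         else:
--             current.append(raw.rstrip('\n').rstrip('\r'))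
--     if current is not None:
--         results.append('\n'.join(current))
--     return results
-- ===== Notes on version B (the rewrite author's own statement) =====
-- stated objective: simpler
-- what changed: Replaces A's two-pass boundary computation (precompute all INSERT start indices, then re-scan each segment with an inner loop and break) by a single forward pass with a current-statement buffer and an idle/collecting state, flushing on each new top-level INSERT.
import Mathlib
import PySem

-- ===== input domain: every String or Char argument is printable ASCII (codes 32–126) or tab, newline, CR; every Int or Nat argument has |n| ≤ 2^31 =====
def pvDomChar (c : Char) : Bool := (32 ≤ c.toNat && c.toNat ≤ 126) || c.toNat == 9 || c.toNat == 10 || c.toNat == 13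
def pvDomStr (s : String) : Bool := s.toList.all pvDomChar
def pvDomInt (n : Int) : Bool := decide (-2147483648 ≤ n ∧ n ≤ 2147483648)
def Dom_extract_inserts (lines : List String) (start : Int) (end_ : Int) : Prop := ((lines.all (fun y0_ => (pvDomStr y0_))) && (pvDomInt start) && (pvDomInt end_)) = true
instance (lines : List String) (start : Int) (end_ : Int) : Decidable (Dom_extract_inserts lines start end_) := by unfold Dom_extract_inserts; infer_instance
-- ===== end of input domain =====

-- B replaces A's two-pass boundary computation by a single forward pass with a
-- current-statement buffer and an idle/collecting state (objective: simpler).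

-- shared line-level helpers (faithful ports of the Python expressions both versions use)
-- lines[i] (negative index wraps; out-of-range raises, excluded by Pre_)
def pvLine (lines : List String) (i : Int) : String := (PySem.List.pyGet? lines i).getD ""
-- s.rstrip('\n').rstrip('\r'): hand-port (PySem has no rstrip-with-chars); exact — Python
-- removes ALL trailing occurrences of the given character, here via dropWhile on the reverse
def pvRstripNR (s : String) : String :=
  String.ofList (((s.toList.reverse.dropWhile (· == '\n')).dropWhile (· == '\r')).reverse)
-- the top-level-INSERT test both Pythons spell out verbatim
def pvIsTop (raw : String) : Bool :=
  PySem.Str.startswith (PySem.Str.strip raw) "INSERT INTO [${flyway:defaultSchema}]"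
    && !(PySem.Str.startswith raw "    ") && !(PySem.Str.startswith raw "\t")

-- ===== PORT A =====
-- inner loop 'for j in range(line_num, boundary)' with its continue/break chain
def pvInnerA (lines : List String) (line_num : Int) : List Int → List String
  | [] => []
  | j :: js =>
    let ls := PySem.Str.strip (pvLine lines j)
    if ls = "" then pvInnerA lines line_num js
    else if ls = "GO" then pvInnerA lines line_num js
    else if ls = "GO;" then pvInnerA lines line_num js
    else if PySem.Str.startswith ls "IF @@ERROR" then pvInnerA lines line_num js
    else if PySem.Str.startswith ls "PRINT(" then pvInnerA lines line_num js
    else if PySem.Str.startswith ls "PRINT N" then pvInnerA lines line_num js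
    else if j > line_num && PySem.Str.startswith ls "INSERT INTO" then []
    else pvRstripNR (pvLine lines j) :: pvInnerA lines line_num js

-- second pass: 'for idx, line_num in enumerate(insert_starts)' with the lookahead boundary
def pvSecondA (lines : List String) (end_ : Int) : List Int → List String
  | [] => []
  | line_num :: rest =>
    let boundary := match rest with | [] => end_ + 1 | q :: _ => q
    PySem.Str.join "\n" (pvInnerA lines line_num (PySem.List.pyRange line_num boundary 1))
      :: pvSecondA lines end_ rest

def extract_inserts (lines : List String) (start : Int) (end_ : Int) : List String :=
  let insert_starts := (PySem.List.pyRange start (end_ + 1) 1).foldl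
      (fun acc i => if pvIsTop (pvLine lines i) then acc ++ [i] else acc) []
  pvSecondA lines end_ insert_starts

-- ===== PORT B =====
-- one step of Source B's loop body; state = (results, current buffer or None)
def pvStepB (st : List String × Option (List String)) (raw : String) : List String × Option (List String) :=
  let stripped := PySem.Str.strip raw
  if pvIsTop raw then
    ((match st.2 with
      | some cur => st.1 ++ [PySem.Str.join "\n" cur]
      | none => st.1), some [pvRstripNR raw])
  else match st.2 with
  | none => (st.1, none)
  | some cur =>
    if stripped = "" then (st.1, some cur)
    else if stripped = "GO" || stripped = "GO;" then (st.1, some cur)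
    else if PySem.Str.startswith stripped "IF @@ERROR" || PySem.Str.startswith stripped "PRINT("
            || PySem.Str.startswith stripped "PRINT N" then (st.1, some cur)
    else if PySem.Str.startswith stripped "INSERT INTO" then (st.1 ++ [PySem.Str.join "\n" cur], none)
    else (st.1, some (cur ++ [pvRstripNR raw]))

def extract_inserts_alt (lines : List String) (start : Int) (end_ : Int) : List String :=
  let window := (PySem.List.pyRange start (end_ + 1) 1).map (fun i => pvLine lines i)
  let st := window.foldl pvStepB ([], none)
  match st.2 with
  | some cur => st.1 ++ [PySem.Str.join "\n" cur]
  | none => st.1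

-- ===== PRECONDITION & SPEC =====
-- Pre_ excludes exactly the inputs on which Python A raises IndexError: some index in
-- [start, end] outside [-len(lines), len(lines)).
def Pre_extract_inserts (lines : List String) (start : Int) (end_ : Int) : Prop :=
  start ≤ end_ → (-(lines.length : Int) ≤ start ∧ end_ < (lines.length : Int))
instance (lines : List String) (start : Int) (end_ : Int) : Decidable (Pre_extract_inserts lines start end_) := by
  unfold Pre_extract_inserts; infer_instance

def pvWitness_extract_inserts : List String × Int × Int :=
  (["INSERT INTO [${flyway:defaultSchema}].[T] VALUES (1)", "GO", "x"], 0, 2)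

def Spec_extract_inserts (lines : List String) (start : Int) (end_ : Int) (out : List String) : Prop :=
  out = extract_inserts_alt lines start end_
instance (lines : List String) (start : Int) (end_ : Int) (out : List String) : Decidable (Spec_extract_inserts lines start end_ out) := by
  unfold Spec_extract_inserts; infer_instance

-- ===== CLAIM (what is proved, stated in full; the proofs are below) =====
def Claim_equal_extract_inserts : Prop := ∀ (lines : List String) (start : Int) (end_ : Int), Dom_extract_inserts lines start end_ → Pre_extract_inserts lines start end_ → Spec_extract_inserts lines start end_ (extract_inserts lines start end_)

-- ===== LEMMAS AND PROOFS =====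

-- the skip conditions, on the stripped line
def pvSkip (s : String) : Bool :=
  s = "" || s = "GO" || s = "GO;" || PySem.Str.startswith s "IF @@ERROR"
    || PySem.Str.startswith s "PRINT(" || PySem.Str.startswith s "PRINT N"
def pvIsIns (s : String) : Bool := PySem.Str.startswith s "INSERT INTO"

-- inner loop tail (every j > line_num, so the break guard is always armed)
def pvInnerTail (lines : List String) : List Int → List String
  | [] => []
  | j :: js =>
    let ls := PySem.Str.strip (pvLine lines j)
    if pvSkip ls then pvInnerTail lines js
    else if pvIsIns ls then []
    else pvRstripNR (pvLine lines j) :: pvInnerTail lines js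

-- the state machine as mutual recursion over the window (idle / collecting)
mutual
def pvIdleS : List String → List String
  | [] => []
  | x :: xs => if pvIsTop x then pvSegS xs [pvRstripNR x] else pvIdleS xs
def pvSegS : List String → List String → List String
  | [], parts => [PySem.Str.join "\n" parts]
  | x :: xs, parts =>
    if pvIsTop x then PySem.Str.join "\n" parts :: pvSegS xs [pvRstripNR x]
    else if pvSkip (PySem.Str.strip x) then pvSegS xs parts
    else if pvIsIns (PySem.Str.strip x) then PySem.Str.join "\n" parts :: pvIdleS xs
    else pvSegS xs (parts ++ [pvRstripNR x])
end

-- a prefix-of test on the stripped line forces facts about its first characters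
theorem pvTop_facts (raw : String) (h : pvIsTop raw = true) :
    pvSkip (PySem.Str.strip raw) = false ∧ pvIsIns (PySem.Str.strip raw) = true := by
  have h' : PySem.Str.startswith (PySem.Str.strip raw) "INSERT INTO [${flyway:defaultSchema}]" = true := by
    simp only [pvIsTop, Bool.and_eq_true] at h; exact h.1.1
  simp at h'
  rw [PySem.Chars.startswith_iff] at h'
  have hlen := h'.length_le
  constructor
  · have hE : ¬ PySem.Str.strip raw = "" := by
      intro e
      have : (PySem.Str.strip raw).toList = [] := by rw [e]; rfl
      rw [PySem.Str.toList_strip] at this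
      rw [this] at hlen
      simp at hlen
    have hG : ¬ PySem.Str.strip raw = "GO" := by
      intro e
      have : (PySem.Str.strip raw).toList = ['G', 'O'] := by rw [e]; rfl
      rw [PySem.Str.toList_strip] at this
      rw [this] at hlen
      simp at hlen
    have hG2 : ¬ PySem.Str.strip raw = "GO;" := by
      intro e
      have : (PySem.Str.strip raw).toList = ['G', 'O', ';'] := by rw [e]; rfl
      rw [PySem.Str.toList_strip] at this
      rw [this] at hlen
      simp at hlen
    have hIF : PySem.Str.startswith (PySem.Str.strip raw) "IF @@ERROR" = false := by
      apply Bool.eq_false_iff.mpr; intro hq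
      simp at hq
      rw [PySem.Chars.startswith_iff] at hq
      rcases List.prefix_or_prefix_of_prefix hq h' with hc | hc <;> revert hc <;> decide
    have hP1 : PySem.Str.startswith (PySem.Str.strip raw) "PRINT(" = false := by
      apply Bool.eq_false_iff.mpr; intro hq
      simp at hq
      rw [PySem.Chars.startswith_iff] at hq
      rcases List.prefix_or_prefix_of_prefix hq h' with hc | hc <;> revert hc <;> decide
    have hP2 : PySem.Str.startswith (PySem.Str.strip raw) "PRINT N" = false := by
      apply Bool.eq_false_iff.mpr; intro hq
      simp at hq
      rw [PySem.Chars.startswith_iff] at hq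
      rcases List.prefix_or_prefix_of_prefix hq h' with hc | hc <;> revert hc <;> decide
    simp only [pvSkip, hIF, hP1, hP2, decide_eq_false hE, decide_eq_false hG,
      decide_eq_false hG2, Bool.or_self]
  · simp only [pvIsIns]
    simp
    rw [PySem.Chars.startswith_iff]
    exact List.IsPrefix.trans (by decide) h'

-- one step of A's inner loop, by cases on the line
theorem pvStepA_skip (lines : List String) (p j : Int) (js : List Int)
    (hsk : pvSkip (PySem.Str.strip (pvLine lines j)) = true) :
    pvInnerA lines p (j :: js) = pvInnerA lines p js := by
  simp only [pvInnerA]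
  split_ifs with h1 h2 h3 h4 h5 h6 h7 <;> try rfl
  all_goals exfalso
  all_goals simp only [pvSkip, Bool.or_eq_true, decide_eq_true_eq] at hsk
  · rcases hsk with ((((e|e)|e)|e)|e)|e
    exacts [h1 e, h2 e, h3 e, h4 e, h5 e, h6 e]
  · rcases hsk with ((((e|e)|e)|e)|e)|e
    exacts [h1 e, h2 e, h3 e, h4 e, h5 e, h6 e]

theorem pvSkip_false_parts (ls : String) (hsk : pvSkip ls = false) :
    ¬ ls = "" ∧ ¬ ls = "GO" ∧ ¬ ls = "GO;"
      ∧ ¬ PySem.Str.startswith ls "IF @@ERROR" = true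
      ∧ ¬ PySem.Str.startswith ls "PRINT(" = true
      ∧ ¬ PySem.Str.startswith ls "PRINT N" = true := by
  have h' : ¬ pvSkip ls = true := by simp [hsk]
  simp only [pvSkip, Bool.or_eq_true, decide_eq_true_eq, not_or] at h'
  obtain ⟨⟨⟨⟨⟨a1, a2⟩, a3⟩, a4⟩, a5⟩, a6⟩ := h'
  exact ⟨a1, a2, a3, a4, a5, a6⟩

theorem pvStepA_break (lines : List String) (p j : Int) (js : List Int)
    (hsk : pvSkip (PySem.Str.strip (pvLine lines j)) = false)
    (hins : pvIsIns (PySem.Str.strip (pvLine lines j)) = true)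
    (hj : p < j) :
    pvInnerA lines p (j :: js) = [] := by
  obtain ⟨a1, a2, a3, a4, a5, a6⟩ := pvSkip_false_parts _ hsk
  simp only [pvIsIns] at hins
  simp only [pvInnerA]
  rw [if_neg a1, if_neg a2, if_neg a3, if_neg a4, if_neg a5, if_neg a6,
    if_pos (by rw [hins, Bool.and_true]; exact decide_eq_true hj)]

theorem pvStepA_append (lines : List String) (p j : Int) (js : List Int)
    (hsk : pvSkip (PySem.Str.strip (pvLine lines j)) = false)
    (hg : (decide (j > p) && PySem.Str.startswith (PySem.Str.strip (pvLine lines j)) "INSERT INTO") = false) :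
    pvInnerA lines p (j :: js) = pvRstripNR (pvLine lines j) :: pvInnerA lines p js := by
  obtain ⟨a1, a2, a3, a4, a5, a6⟩ := pvSkip_false_parts _ hsk
  simp only [pvInnerA]
  rw [if_neg a1, if_neg a2, if_neg a3, if_neg a4, if_neg a5, if_neg a6,
    if_neg (by rw [hg]; exact Bool.false_ne_true)]

-- one step of the tail collector
theorem pvTail_skip (lines : List String) (j : Int) (js : List Int)
    (hsk : pvSkip (PySem.Str.strip (pvLine lines j)) = true) :
    pvInnerTail lines (j :: js) = pvInnerTail lines js := by
  simp only [pvInnerTail]; rw [if_pos hsk]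

theorem pvTail_break (lines : List String) (j : Int) (js : List Int)
    (hsk : pvSkip (PySem.Str.strip (pvLine lines j)) = false)
    (hins : pvIsIns (PySem.Str.strip (pvLine lines j)) = true) :
    pvInnerTail lines (j :: js) = [] := by
  simp only [pvInnerTail]
  rw [if_neg (by simp [hsk]), if_pos hins]

theorem pvTail_append (lines : List String) (j : Int) (js : List Int)
    (hsk : pvSkip (PySem.Str.strip (pvLine lines j)) = false)
    (hins : pvIsIns (PySem.Str.strip (pvLine lines j)) = false) :
    pvInnerTail lines (j :: js) = pvRstripNR (pvLine lines j) :: pvInnerTail lines js := by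
  simp only [pvInnerTail]
  rw [if_neg (by simp [hsk]), if_neg (by simp [hins])]

-- A's inner loop past its first line is the unguarded tail collector
theorem pvInnerA_eq_tail (lines : List String) (p : Int) (js : List Int)
    (h : ∀ j ∈ js, p < j) : pvInnerA lines p js = pvInnerTail lines js := by
  induction js with
  | nil => rfl
  | cons j js ih =>
    have hj : p < j := h j List.mem_cons_self
    have ih' := ih (fun x hx => h x (List.mem_cons_of_mem _ hx))
    by_cases hsk : pvSkip (PySem.Str.strip (pvLine lines j)) = true
    · rw [pvStepA_skip lines p j js hsk, pvTail_skip lines j js hsk, ih']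
    · rw [Bool.not_eq_true] at hsk
      by_cases hins : pvIsIns (PySem.Str.strip (pvLine lines j)) = true
      · rw [pvStepA_break lines p j js hsk hins hj, pvTail_break lines j js hsk hins]
      · rw [Bool.not_eq_true] at hins
        have hins' : PySem.Str.startswith (PySem.Str.strip (pvLine lines j)) "INSERT INTO" = false := by
          simpa only [pvIsIns] using hins
        rw [pvStepA_append lines p j js hsk (by rw [hins', Bool.and_false]),
            pvTail_append lines j js hsk hins, ih']

-- head step of the inner loop on a top line
theorem pvInnerA_top (lines : List String) (a b : Int) (hab : a < b)
    (htop : pvIsTop (pvLine lines a) = true) :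
    pvInnerA lines a (PySem.List.pyRange a b 1)
      = pvRstripNR (pvLine lines a) :: pvInnerTail lines (PySem.List.pyRange (a + 1) b 1) := by
  obtain ⟨hskF, _⟩ := pvTop_facts _ htop
  rw [PySem.List.pyRange_one_cons hab]
  rw [pvStepA_append lines a a _ hskF (by simp)]
  rw [pvInnerA_eq_tail lines a _ (fun x hx => by
    rw [PySem.List.mem_pyRange_one] at hx; omega)]

-- B's foldl equals the mutual state machine
theorem pvFoldB (xs : List String) (res : List String) (cur : Option (List String)) :
    (match (xs.foldl pvStepB (res, cur)).2 with
     | some c => (xs.foldl pvStepB (res, cur)).1 ++ [PySem.Str.join "\n" c]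
     | none => (xs.foldl pvStepB (res, cur)).1)
      = res ++ (match cur with | none => pvIdleS xs | some parts => pvSegS xs parts) := by
  induction xs generalizing res cur with
  | nil => cases cur <;> simp [pvIdleS, pvSegS]
  | cons x xs ih =>
    simp only [List.foldl_cons]
    by_cases htop : pvIsTop x = true
    · cases cur with
      | none =>
        rw [show pvStepB (res, none) x = (res, some [pvRstripNR x]) by simp [pvStepB, htop]]
        rw [ih]
        simp [pvIdleS, htop]
      | some parts =>
        rw [show pvStepB (res, some parts) x
              = (res ++ [PySem.Str.join "\n" parts], some [pvRstripNR x]) by simp [pvStepB, htop]]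
        rw [ih]
        simp [pvSegS, htop]
    · cases cur with
      | none =>
        rw [show pvStepB (res, none) x = (res, none) by simp [pvStepB, htop]]
        rw [ih]
        simp [pvIdleS, htop]
      | some parts =>
        by_cases hsk : pvSkip (PySem.Str.strip x) = true
        · rw [show pvStepB (res, some parts) x = (res, some parts) by
            simp only [pvSkip, Bool.or_eq_true, decide_eq_true_eq] at hsk
            rcases hsk with ((((h|h)|h)|h)|h)|h <;> (try simp at h) <;>
              simp [pvStepB, htop, h]]
          rw [ih]
          simp [pvSegS, htop, hsk]
        · simp only [pvSkip, Bool.or_eq_true, decide_eq_true_eq, not_or] at hsk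
          obtain ⟨⟨⟨⟨⟨h1, h2⟩, h3⟩, h4⟩, h5⟩, h6⟩ := hsk
          try simp at h4 h5 h6
          by_cases hins : pvIsIns (PySem.Str.strip x) = true <;>
            simp only [pvIsIns] at hins <;> (try simp at hins)
          · rw [show pvStepB (res, some parts) x = (res ++ [PySem.Str.join "\n" parts], none) by
              simp [pvStepB, htop, h1, h2, h3, h4, h5, h6, hins]]
            rw [ih]
            simp [pvSegS, htop, h1, h2, h3, h4, h5, h6, pvSkip, pvIsIns, hins]
          · rw [show pvStepB (res, some parts) x = (res, some (parts ++ [pvRstripNR x])) by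
              simp [pvStepB, htop, h1, h2, h3, h4, h5, h6, hins]]
            rw [ih]
            simp [pvSegS, htop, h1, h2, h3, h4, h5, h6, pvSkip, pvIsIns, hins]

-- main induction: the state machine over the window equals A's boundary-based passes
def pvSegSpec (lines : List String) (end_ a : Int) (parts : List String) : List String :=
  match (PySem.List.pyRange a (end_ + 1) 1).filter (fun i => pvIsTop (pvLine lines i)) with
  | [] => [PySem.Str.join "\n" (parts ++ pvInnerTail lines (PySem.List.pyRange a (end_ + 1) 1))]
  | q :: rest => PySem.Str.join "\n" (parts ++ pvInnerTail lines (PySem.List.pyRange a q 1))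
      :: pvSecondA lines end_ (q :: rest)

theorem pvMain (lines : List String) (end_ : Int) : ∀ (n : Nat) (a : Int), ((end_ + 1) - a).toNat = n →
    (pvIdleS ((PySem.List.pyRange a (end_ + 1) 1).map (fun i => pvLine lines i))
       = pvSecondA lines end_ ((PySem.List.pyRange a (end_ + 1) 1).filter (fun i => pvIsTop (pvLine lines i))))
    ∧ (∀ parts, pvSegS ((PySem.List.pyRange a (end_ + 1) 1).map (fun i => pvLine lines i)) parts
       = pvSegSpec lines end_ a parts) := by
  intro n
  induction n with
  | zero =>
    intro a ha
    have hnil : PySem.List.pyRange a (end_ + 1) 1 = [] := PySem.List.pyRange_one_eq_nil (by omega)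
    constructor
    · rw [hnil]; rfl
    · intro parts
      simp only [pvSegSpec, hnil, List.filter_nil, List.map_nil, pvSegS, pvInnerTail,
        List.append_nil]
  | succ n ih =>
    intro a ha
    have hab : a < end_ + 1 := by omega
    have hcons : PySem.List.pyRange a (end_ + 1) 1 = a :: PySem.List.pyRange (a + 1) (end_ + 1) 1 :=
      PySem.List.pyRange_one_cons hab
    have ih' := ih (a + 1) (by omega)
    by_cases htop : pvIsTop (pvLine lines a) = true
    · -- a starts a new top-level INSERT
      obtain ⟨hskF, hinsT⟩ := pvTop_facts _ htop
      have key : pvSegS ((PySem.List.pyRange (a + 1) (end_ + 1) 1).map (fun i => pvLine lines i))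
            [pvRstripNR (pvLine lines a)] = pvSecondA lines end_
            (a :: (PySem.List.pyRange (a + 1) (end_ + 1) 1).filter (fun i => pvIsTop (pvLine lines i))) := by
        rw [ih'.2 [pvRstripNR (pvLine lines a)]]
        cases hF : (PySem.List.pyRange (a + 1) (end_ + 1) 1).filter (fun i => pvIsTop (pvLine lines i)) with
        | nil =>
          simp only [pvSegSpec, hF, pvSecondA]
          rw [pvInnerA_top lines a (end_ + 1) hab htop, List.singleton_append]
        | cons q rest =>
          have hmem : q ∈ PySem.List.pyRange (a + 1) (end_ + 1) 1 :=
            List.mem_of_mem_filter (by rw [hF]; exact List.mem_cons_self)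
          rw [PySem.List.mem_pyRange_one] at hmem
          simp only [pvSegSpec, hF, pvSecondA]
          rw [pvInnerA_top lines a q (by omega) htop, List.singleton_append]
      constructor
      · rw [hcons, List.map_cons, List.filter_cons]
        simp only [htop, if_true]
        rw [show pvIdleS (pvLine lines a :: (PySem.List.pyRange (a + 1) (end_ + 1) 1).map (fun i => pvLine lines i))
              = pvSegS ((PySem.List.pyRange (a + 1) (end_ + 1) 1).map (fun i => pvLine lines i))
                  [pvRstripNR (pvLine lines a)] from by rw [pvIdleS, if_pos htop]]
        exact key
      · intro parts
        have hFa : (PySem.List.pyRange a (end_ + 1) 1).filter (fun i => pvIsTop (pvLine lines i))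
            = a :: (PySem.List.pyRange (a + 1) (end_ + 1) 1).filter (fun i => pvIsTop (pvLine lines i)) := by
          rw [hcons, List.filter_cons]; simp only [htop, if_true]
        rw [hcons, List.map_cons]
        rw [show pvSegS (pvLine lines a :: (PySem.List.pyRange (a + 1) (end_ + 1) 1).map (fun i => pvLine lines i)) parts
              = PySem.Str.join "\n" parts :: pvSegS ((PySem.List.pyRange (a + 1) (end_ + 1) 1).map (fun i => pvLine lines i))
                  [pvRstripNR (pvLine lines a)] from by rw [pvSegS, if_pos htop]]
        simp only [pvSegSpec, hFa]
        rw [PySem.List.pyRange_one_eq_nil (by omega : a ≤ a)]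
        rw [key]
        simp [pvInnerTail]
    · -- a is not a top-level INSERT start
      have hFa : (PySem.List.pyRange a (end_ + 1) 1).filter (fun i => pvIsTop (pvLine lines i))
          = (PySem.List.pyRange (a + 1) (end_ + 1) 1).filter (fun i => pvIsTop (pvLine lines i)) := by
        rw [hcons, List.filter_cons]; simp only [htop]; simp
      constructor
      · rw [hFa, hcons, List.map_cons]
        rw [show pvIdleS (pvLine lines a :: (PySem.List.pyRange (a + 1) (end_ + 1) 1).map (fun i => pvLine lines i))
              = pvIdleS ((PySem.List.pyRange (a + 1) (end_ + 1) 1).map (fun i => pvLine lines i)) from by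
            rw [pvIdleS, if_neg (by simp [htop])]]
        exact ih'.1
      · intro parts
        by_cases hsk : pvSkip (PySem.Str.strip (pvLine lines a)) = true
        · -- skipped line: both sides ignore it
          rw [hcons, List.map_cons]
          rw [show pvSegS (pvLine lines a :: (PySem.List.pyRange (a + 1) (end_ + 1) 1).map (fun i => pvLine lines i)) parts
                = pvSegS ((PySem.List.pyRange (a + 1) (end_ + 1) 1).map (fun i => pvLine lines i)) parts from by
              rw [pvSegS, if_neg (by simp [htop]), if_pos hsk]]
          rw [ih'.2 parts]
          cases hF : (PySem.List.pyRange (a + 1) (end_ + 1) 1).filter (fun i => pvIsTop (pvLine lines i)) with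
          | nil =>
            simp only [pvSegSpec, hF, hFa ▸ hF]
            rw [hcons, pvTail_skip lines a _ hsk]
          | cons q rest =>
            have hmem : q ∈ PySem.List.pyRange (a + 1) (end_ + 1) 1 :=
              List.mem_of_mem_filter (by rw [hF]; exact List.mem_cons_self)
            rw [PySem.List.mem_pyRange_one] at hmem
            simp only [pvSegSpec, hF, hFa ▸ hF]
            rw [PySem.List.pyRange_one_cons (by omega : a < q), pvTail_skip lines a _ hsk]
        · rw [Bool.not_eq_true] at hsk
          by_cases hins : pvIsIns (PySem.Str.strip (pvLine lines a)) = true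
          · -- an embedded INSERT INTO: flush and go idle
            rw [hcons, List.map_cons]
            rw [show pvSegS (pvLine lines a :: (PySem.List.pyRange (a + 1) (end_ + 1) 1).map (fun i => pvLine lines i)) parts
                  = PySem.Str.join "\n" parts
                      :: pvIdleS ((PySem.List.pyRange (a + 1) (end_ + 1) 1).map (fun i => pvLine lines i)) from by
                rw [pvSegS, if_neg (by simp [htop]), if_neg (by simp [hsk]), if_pos hins]]
            rw [ih'.1]
            cases hF : (PySem.List.pyRange (a + 1) (end_ + 1) 1).filter (fun i => pvIsTop (pvLine lines i)) with
            | nil =>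
              simp only [pvSegSpec, hFa ▸ hF]
              rw [hcons, pvTail_break lines a _ hsk hins]
              simp [pvSecondA]
            | cons q rest =>
              have hmem : q ∈ PySem.List.pyRange (a + 1) (end_ + 1) 1 :=
                List.mem_of_mem_filter (by rw [hF]; exact List.mem_cons_self)
              rw [PySem.List.mem_pyRange_one] at hmem
              simp only [pvSegSpec, hFa ▸ hF]
              rw [PySem.List.pyRange_one_cons (by omega : a < q), pvTail_break lines a _ hsk hins]
              simp
          · -- ordinary line: appended to the current buffer
            rw [Bool.not_eq_true] at hins
            rw [hcons, List.map_cons]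
            rw [show pvSegS (pvLine lines a :: (PySem.List.pyRange (a + 1) (end_ + 1) 1).map (fun i => pvLine lines i)) parts
                  = pvSegS ((PySem.List.pyRange (a + 1) (end_ + 1) 1).map (fun i => pvLine lines i))
                      (parts ++ [pvRstripNR (pvLine lines a)]) from by
                rw [pvSegS, if_neg (by simp [htop]), if_neg (by simp [hsk]), if_neg (by simp [hins])]]
            rw [ih'.2 (parts ++ [pvRstripNR (pvLine lines a)])]
            cases hF : (PySem.List.pyRange (a + 1) (end_ + 1) 1).filter (fun i => pvIsTop (pvLine lines i)) with
            | nil =>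
              simp only [pvSegSpec, hF, hFa ▸ hF]
              rw [hcons, pvTail_append lines a _ hsk hins]
              simp
            | cons q rest =>
              have hmem : q ∈ PySem.List.pyRange (a + 1) (end_ + 1) 1 :=
                List.mem_of_mem_filter (by rw [hF]; exact List.mem_cons_self)
              rw [PySem.List.mem_pyRange_one] at hmem
              simp only [pvSegSpec, hF, hFa ▸ hF]
              rw [PySem.List.pyRange_one_cons (by omega : a < q), pvTail_append lines a _ hsk hins]
              simp

-- ===== VERDICT (by name: the statement is the Claim_ definition above) =====
theorem extract_inserts_spec : Claim_equal_extract_inserts := by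
  intro lines start end_ _ _
  unfold Spec_extract_inserts extract_inserts extract_inserts_alt
  rw [PySem.List.foldl_append_if_eq_filter]
  rw [pvFoldB]
  rw [(pvMain lines end_ ((end_ + 1) - start).toNat start rfl).1]
  simp
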